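-- pv_equiv track=rewrite | github.com/ianmnz/adventofcode | src/y2024/d19.py | count_nb_arrangements
-- ===== SOURCE A (Python) =====
-- from functools import cache, partial
--
-- def count_nb_arrangements(patterns: list[str], design: str) -> int:
--     @cache
--     def _count(design: str):
--         if not design:
--             return 1
--
--         return sum(
--             _count(pruned)
--             for p in patterns
--             if (pruned := design.removeprefix(p)) != design
--         )
--
--     return _count(design)
-- ===== SOURCE B (Python) =====
-- def count_nb_arrangements(patterns: list[str], design: str) -> int:
--     # Group the (nonempty) patterns by length into multiplicity tables, then fill a
--     # suffix DP table back-to-front: dp[0] = number of arrangements of the current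
--     # suffix; each position costs one substring lookup per distinct pattern length.
--     by_len = {}
--     for p in patterns:
--         if p:
--             c = by_len.setdefault(len(p), {})
--             c[p] = c.get(p, 0) + 1
--     dp = [1]
--     for i in range(len(design) - 1, -1, -1):
--         total = 0
--         for L, cnt in by_len.items():
--             if L <= len(dp):
--                 total += cnt.get(design[i:i + L], 0) * dp[L - 1]
--         dp = [total] + dp
--     return dp[0]
-- ===== Notes on version B (the rewrite author's own statement) =====
-- stated objective: faster
-- what changed: Replaces A's memoized top-down recursion that scans every pattern with string.removeprefix at each suffix by a multiplicity table of the patterns grouped by length (built once) plus an explicit back-to-front suffix DP list, so each position does one hash lookup per distinct pattern length instead of a prefix test per pattern.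
import Mathlib
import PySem

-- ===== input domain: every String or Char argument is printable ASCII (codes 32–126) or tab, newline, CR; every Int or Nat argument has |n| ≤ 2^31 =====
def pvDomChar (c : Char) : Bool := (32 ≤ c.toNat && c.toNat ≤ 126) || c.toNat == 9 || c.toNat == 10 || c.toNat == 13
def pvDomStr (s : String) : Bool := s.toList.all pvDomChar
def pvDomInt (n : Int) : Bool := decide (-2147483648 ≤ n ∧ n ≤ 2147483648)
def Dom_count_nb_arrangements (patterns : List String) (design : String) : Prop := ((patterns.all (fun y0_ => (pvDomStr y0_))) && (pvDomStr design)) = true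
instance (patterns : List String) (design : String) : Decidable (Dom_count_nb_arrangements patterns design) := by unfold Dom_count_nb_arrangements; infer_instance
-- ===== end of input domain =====

-- B replaces A's memoized top-down recursion over all patterns by a length-grouped
-- multiplicity table plus an explicit back-to-front suffix DP list (objective: alternative).

-- ===== PORT A =====
-- design.removeprefix(p), ported by hand: Python drops p when design starts with p,
-- else returns design unchanged (exact on all inputs).
def pvRemovePrefix (p s : List Char) : List Char :=
  if PySem.Chars.startswith s p then s.drop p.length else s

-- used by the port's decreasing_by (the recursive call is on a strictly shorter suffix)
lemma pvRemovePrefix_length_lt (p s : List Char) (h : pvRemovePrefix p s ≠ s) :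
    (pvRemovePrefix p s).length < s.length := by
  unfold pvRemovePrefix at *
  by_cases hs : PySem.Chars.startswith s p = true
  · rw [if_pos hs] at h ⊢
    have hpre : p <+: s := (PySem.Chars.startswith_iff s p).mp hs
    have hlen : p.length ≤ s.length := hpre.length_le
    have hp : p ≠ [] := by
      intro hnil; subst hnil; simp at h
    have : 0 < p.length := List.length_pos_iff.mpr hp
    simp only [List.length_drop]
    omega
  · rw [if_neg hs] at h; exact absurd rfl h

-- the @cache-d inner _count: recursion on the design suffix, scanning all patterns
def pvCountA (patterns : List (List Char)) (s : List Char) : Int :=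
  if s = [] then 1
  else (patterns.map (fun p =>
      if h : pvRemovePrefix p s ≠ s then pvCountA patterns (pvRemovePrefix p s) else 0)).sum
termination_by s.length
decreasing_by exact pvRemovePrefix_length_lt _ _ h

def count_nb_arrangements (patterns : List String) (design : String) : Int :=
  pvCountA (patterns.map String.toList) design.toList

-- ===== PORT B =====
-- c = by_len.setdefault(len(p), {}); c[p] = c.get(p, 0) + 1   (c is a reference, so the
-- bucket stored under len(p) is the updated counter)
def pvBucket (d : PySem.Dict Int (PySem.Dict (List Char) Int)) (p : List Char) :
    PySem.Dict (List Char) Int :=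
  let c := d.getD (p.length : Int) PySem.Dict.empty
  c.insert p (c.getD p 0 + 1)

def pvByLen (patterns : List (List Char)) : PySem.Dict Int (PySem.Dict (List Char) Int) :=
  patterns.foldl (fun d p => if p ≠ [] then d.insert (p.length : Int) (pvBucket d p) else d)
    PySem.Dict.empty

-- the back-to-front loop: one step per design position, dp list prepended; at suffix
-- c :: rest, design[i:i+L] is the slice [0:L] of the suffix and dp[i+L] is dp[L-1] of tl
def pvDpB (byLen : PySem.Dict Int (PySem.Dict (List Char) Int)) : List Char → List Int
  | [] => [1]
  | c :: rest =>
      let tl := pvDpB byLen rest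
      (byLen.items.foldl (fun total q =>
        if q.1 ≤ (tl.length : Int) then
          total + q.2.getD (PySem.List.slice (c :: rest) (some 0) (some q.1)) 0 *
            PySem.List.pyGetD tl (q.1 - 1) 0
        else total) 0) :: tl

def count_nb_arrangements_alt (patterns : List String) (design : String) : Int :=
  PySem.List.pyGetD (pvDpB (pvByLen (patterns.map String.toList)) design.toList) 0 0

-- ===== PRECONDITION & SPEC =====
def Spec_count_nb_arrangements (patterns : List String) (design : String) (out : Int) : Prop := out = count_nb_arrangements_alt patterns design
instance (patterns : List String) (design : String) (out : Int) : Decidable (Spec_count_nb_arrangements patterns design out) := by unfold Spec_count_nb_arrangements; infer_instance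

-- ===== CLAIM (what is proved, stated in full; the proofs are below) =====
def Claim_equal_count_nb_arrangements : Prop := ∀ (patterns : List String) (design : String), Dom_count_nb_arrangements patterns design → Spec_count_nb_arrangements patterns design (count_nb_arrangements patterns design)

-- ===== LEMMAS AND PROOFS =====

-- keys of the length-grouped dict stay distinct
lemma pvByLen_keys_nodup (ps : List (List Char)) : (pvByLen ps).keys.Nodup := by
  unfold pvByLen
  rw [PySem.List.foldl_ite_eq_foldl_filter]
  exact PySem.Dict.nodup_keys_foldl_insert_key _ (fun p => ((p : List Char).length : Int))
    _ _ PySem.Dict.nodup_keys_empty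

-- one-entry replacement in a sum over a key-nodup items list
lemma pvSumReplace {β : Type} (h : Int × β → Int) (L : Int) (r : Int × β) (c : β) :
    ∀ items : List (Int × β), (items.map Prod.fst).Nodup → (L, c) ∈ items →
    ((items.map (fun q => if q.1 == L then r else q)).map h).sum
      = (items.map h).sum - h (L, c) + h r := by
  intro items
  induction items with
  | nil => intro _ hm; simp at hm
  | cons q t ih =>
      intro hnd hm
      simp only [List.map_cons, List.nodup_cons] at hnd ⊢
      by_cases hq : q.1 = L
      · have hqc : q = (L, c) := by
          rcases List.mem_cons.mp hm with hm1 | hm1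
          · exact hm1.symm
          · exfalso
            have h1 : q.1 ∈ t.map Prod.fst := by
              rw [hq]; exact List.mem_map_of_mem hm1
            exact hnd.1 h1
        subst hqc
        simp only [List.sum_cons, if_pos (beq_iff_eq.mpr hq)]
        have ht : t.map (fun q => if q.1 == L then r else q) = List.map id t := by
          apply List.map_congr_left
          intro x hx
          have hne : x.1 ≠ L := by
            intro hxL
            have h1 : x.1 ∈ t.map Prod.fst := List.mem_map_of_mem hx
            rw [hxL] at h1
            exact hnd.1 h1
          simp [beq_iff_eq, hne]
        rw [ht, List.map_id]; ring
      · have hm' : (L, c) ∈ t := by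
          rcases List.mem_cons.mp hm with hm1 | hm1
          · exact absurd (congrArg Prod.fst hm1.symm) hq
          · exact hm1
        simp only [List.sum_cons]
        rw [if_neg (by simp [hq]), ih hnd.2 hm']; ring

-- one grouping step: inserting pattern p's updated bucket adds exactly p's contribution
lemma pvStepSum (key : Int → List Char) (w : Int → Int)
    (d : PySem.Dict Int (PySem.Dict (List Char) Int)) (p : List Char) (hnd : d.keys.Nodup) :
    ((d.insert (p.length : Int) (pvBucket d p)).items.map
        (fun q => q.2.getD (key q.1) 0 * w q.1)).sum
      = (d.items.map (fun q => q.2.getD (key q.1) 0 * w q.1)).sum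
        + (if key (p.length : Int) = p then w (p.length : Int) else 0) := by
  by_cases hc : d.contains ((p.length : Int)) = true
  · -- replace the existing bucket in place
    obtain ⟨cb, hcg⟩ : ∃ cb, d.get? ((p.length : Int)) = some cb := by
      have hiso := PySem.Dict.contains_eq_isSome_get? d ((p.length : Int))
      rw [hc] at hiso
      exact Option.isSome_iff_exists.mp hiso.symm
    have hmem : (((p.length : Int)), cb) ∈ d.items :=
      PySem.Dict.mem_items_of_get?_eq_some d hcg
    have hgd : d.getD ((p.length : Int)) PySem.Dict.empty = cb :=
      PySem.Dict.getD_of_get?_eq_some d _ hcg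
    rw [PySem.Dict.items_insert_of_contains d (pvBucket d p) hc,
      pvSumReplace _ ((p.length : Int)) (((p.length : Int)), pvBucket d p) cb d.items hnd hmem]
    have hvv : (pvBucket d p).getD (key ((p.length : Int))) 0
        = if key ((p.length : Int)) = p then cb.getD p 0 + 1 else cb.getD (key ((p.length : Int))) 0 := by
      unfold pvBucket
      rw [hgd, PySem.Dict.getD_insert]
    simp only [hvv]
    by_cases hk : key ((p.length : Int)) = p
    · rw [if_pos hk, if_pos hk, hk]; ring
    · rw [if_neg hk, if_neg hk]; ring
  · -- fresh length: the new bucket is appended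
    have hc' : d.contains ((p.length : Int)) = false := by simpa using hc
    have hgd : d.getD ((p.length : Int)) PySem.Dict.empty = PySem.Dict.empty :=
      PySem.Dict.getD_of_not_contains d _ hc'
    rw [PySem.Dict.items_insert_of_not_contains d (pvBucket d p) hc']
    simp only [List.map_append, List.sum_append, List.map_cons, List.map_nil,
      List.sum_cons, List.sum_nil]
    have hvv : (pvBucket d p).getD (key ((p.length : Int))) 0
        = if key ((p.length : Int)) = p then 1 else 0 := by
      unfold pvBucket
      rw [hgd, PySem.Dict.getD_insert]
      simp [PySem.Dict.getD_empty]
    simp only [hvv]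
    by_cases hk : key ((p.length : Int)) = p
    · rw [if_pos hk, if_pos hk]; ring
    · rw [if_neg hk, if_neg hk]; ring

-- the grouping lemma: summing bucket-lookups over the by-length dict equals summing
-- the per-pattern contributions of the original list
lemma pvGroup (key : Int → List Char) (w : Int → Int) (ps : List (List Char)) :
    ((pvByLen ps).items.map (fun q => q.2.getD (key q.1) 0 * w q.1)).sum
      = (ps.map (fun p => if p ≠ [] ∧ key (p.length : Int) = p then w (p.length : Int) else 0)).sum := by
  induction ps using List.reverseRecOn with
  | nil => simp [pvByLen, PySem.Dict.empty]
  | append_singleton ps p ih =>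
      have hstep : pvByLen (ps ++ [p])
          = if p ≠ [] then (pvByLen ps).insert (p.length : Int) (pvBucket (pvByLen ps) p)
            else pvByLen ps := by
        unfold pvByLen
        rw [List.foldl_append]
        rfl
      by_cases hp : p = []
      · subst hp
        simp only [hstep, ne_eq, not_true_eq_false, if_false, List.map_append,
          List.sum_append, ih]
        simp
      · rw [hstep, if_pos hp, pvStepSum key w (pvByLen ps) p (pvByLen_keys_nodup ps),
          List.map_append, List.sum_append, ih]
        simp [hp]

-- A's recursion, rephrased: sum over patterns of the nonempty-prefix contributions
lemma pvCountA_cons (ps : List (List Char)) (s : List Char) (hs : s ≠ []) :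
    pvCountA ps s
      = (ps.map (fun p => if p ≠ [] ∧ p <+: s then pvCountA ps (s.drop p.length) else 0)).sum := by
  rw [pvCountA, if_neg hs]
  congr 1
  apply List.map_congr_left
  intro p _
  by_cases hcond : p ≠ [] ∧ p <+: s
  · have hsw : PySem.Chars.startswith s p = true := (PySem.Chars.startswith_iff s p).mpr hcond.2
    have hrp : pvRemovePrefix p s = s.drop p.length := by unfold pvRemovePrefix; rw [if_pos hsw]
    have hne : pvRemovePrefix p s ≠ s := by
      rw [hrp]
      intro heq
      have hpl : 0 < p.length := List.length_pos_iff.mpr hcond.1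
      have hlen := congrArg List.length heq
      simp only [List.length_drop] at hlen
      have hle : p.length ≤ s.length := hcond.2.length_le
      have hspos : 0 < s.length := List.length_pos_iff.mpr hs
      omega
    rw [dif_pos hne, if_pos hcond, hrp]
  · have heq : pvRemovePrefix p s = s := by
      unfold pvRemovePrefix
      by_cases hsw : PySem.Chars.startswith s p = true
      · have hpre : p <+: s := (PySem.Chars.startswith_iff s p).mp hsw
        have hpnil : p = [] := by
          by_contra hpn
          exact hcond ⟨hpn, hpre⟩
        subst hpnil
        simp
      · rw [if_neg hsw]
    rw [dif_neg (by simp [heq]), if_neg hcond]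

-- the DP list built by B lists A's value on every suffix
lemma pvDpB_spec (ps : List (List Char)) :
    ∀ s : List Char,
      pvDpB (pvByLen ps) s = (List.range (s.length + 1)).map (fun j => pvCountA ps (s.drop j)) := by
  intro s
  induction s with
  | nil => simp [pvDpB, pvCountA]
  | cons c rest ih =>
      rw [pvDpB]
      -- the right-hand side splits into head (j = 0) and tail (j + 1)
      have hrhs : (List.range ((c :: rest).length + 1)).map (fun j => pvCountA ps ((c :: rest).drop j))
          = pvCountA ps (c :: rest)
            :: (List.range (rest.length + 1)).map (fun j => pvCountA ps (rest.drop j)) := by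
        simp only [List.length_cons]
        rw [List.range_succ_eq_map]
        simp [List.map_map, Function.comp_def]
      rw [hrhs, ← ih]
      congr 1
      set tl := pvDpB (pvByLen ps) rest with htl
      have ihtl : tl = (List.range (rest.length + 1)).map (fun j => pvCountA ps (rest.drop j)) :=
        htl.trans ih
      have hlen : tl.length = rest.length + 1 := by rw [ihtl]; simp
      -- step 1: the fold is the sum of a map over the items
      have hfold : (pvByLen ps).items.foldl (fun total q =>
            if q.1 ≤ (tl.length : Int) then
              total + q.2.getD (PySem.List.slice (c :: rest) (some 0) (some q.1)) 0 *
                PySem.List.pyGetD tl (q.1 - 1) 0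
            else total) 0
          = ((pvByLen ps).items.map (fun q =>
              q.2.getD (PySem.List.slice (c :: rest) (some 0) (some q.1)) 0 *
                (if q.1 ≤ (tl.length : Int) then PySem.List.pyGetD tl (q.1 - 1) 0 else 0))).sum := by
        have hfun : (fun (total : Int) (q : Int × PySem.Dict (List Char) Int) =>
              if q.1 ≤ (tl.length : Int) then
                total + q.2.getD (PySem.List.slice (c :: rest) (some 0) (some q.1)) 0 *
                  PySem.List.pyGetD tl (q.1 - 1) 0
              else total)
            = (fun total q =>
              total + q.2.getD (PySem.List.slice (c :: rest) (some 0) (some q.1)) 0 *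
                (if q.1 ≤ (tl.length : Int) then PySem.List.pyGetD tl (q.1 - 1) 0 else 0)) := by
          funext total q
          split_ifs with hq
          · rfl
          · ring
        rw [hfun, PySem.List.foldl_add]
        simp
      rw [hfold,
        pvGroup (fun L => PySem.List.slice (c :: rest) (some 0) (some L))
          (fun L => if L ≤ (tl.length : Int) then PySem.List.pyGetD tl (L - 1) 0 else 0) ps,
        pvCountA_cons ps (c :: rest) (by simp)]
      -- step 2: per-pattern equality
      apply congrArg
      apply List.map_congr_left
      intro p _
      have hslice : PySem.List.slice (c :: rest) (some (0 : Int)) (some ((p.length : Int)))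
          = (c :: rest).take p.length := by
        have h0 : ((0 : Nat) : Int) = (0 : Int) := rfl
        have hsn := PySem.List.slice_natCast (xs := c :: rest) (a := 0) (b := p.length)
        rw [h0] at hsn
        simp only [Nat.sub_zero, List.drop_zero] at hsn
        exact hsn
      simp only [hslice]
      by_cases hcond : p ≠ [] ∧ p <+: (c :: rest)
      · obtain ⟨hp1, hpre⟩ := hcond
        have htake : (c :: rest).take p.length = p := (List.prefix_iff_eq_take.mp hpre).symm
        have hple : p.length ≤ (c :: rest).length := hpre.length_le
        have hcA : p ≠ [] ∧ (c :: rest).take p.length = p := ⟨hp1, htake⟩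
        rw [if_pos hcA, if_pos (show p ≠ [] ∧ p <+: c :: rest from ⟨hp1, hpre⟩)]
        have hppos : 0 < p.length := List.length_pos_iff.mpr hp1
        have hb : ((p.length : Int)) ≤ (tl.length : Int) := by
          rw [hlen]
          simp only [List.length_cons] at hple
          exact_mod_cast hple
        rw [if_pos hb]
        -- pyGetD tl (↑p.length - 1) 0 = pvCountA ps ((c :: rest).drop p.length)
        have hcast : ((p.length : Int)) - 1 = ((p.length - 1 : Nat) : Int) := by omega
        rw [hcast, PySem.List.pyGetD_natCast, ihtl]
        have hjlt : p.length - 1 < rest.length + 1 := by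
          simp only [List.length_cons] at hple; omega
        rw [List.getD_eq_getElem?_getD, List.getElem?_map, List.getElem?_range hjlt]
        simp only [Option.map_some, Option.getD_some]
        have hdrop : rest.drop (p.length - 1) = (c :: rest).drop p.length := by
          have hp2 : p.length = (p.length - 1) + 1 := by omega
          conv_rhs => rw [hp2]
          rw [List.drop_succ_cons]
        rw [hdrop]
      · have hn1 : ¬ (p ≠ [] ∧ (c :: rest).take p.length = p) := by
          intro hcA
          exact hcond ⟨hcA.1, List.prefix_iff_eq_take.mpr hcA.2.symm⟩
        rw [if_neg hn1, if_neg hcond]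

-- ===== VERDICT (by name: the statement is the Claim_ definition above) =====
theorem count_nb_arrangements_spec : Claim_equal_count_nb_arrangements := by
  intro patterns design _
  unfold Spec_count_nb_arrangements count_nb_arrangements count_nb_arrangements_alt
  rw [pvDpB_spec, PySem.List.pyGetD_zero, List.range_succ_eq_map]
  simp
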